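-- pv_equiv track=rewrite | github.com/mhferjani/rca-agent | src/rca_agent/collectors/airflow.py | _extract_error_snippet
-- ===== SOURCE A (Python) =====
-- def _extract_error_snippet(lines: list[str], max_lines: int = 50) -> str:
--     """Extract relevant error portion from logs."""
--     error_keywords = [
--         "error",
--         "exception",
--         "traceback",
--         "failed",
--         "oom",
--         "killed",
--         "timeout",
--     ]
--
--     # Find lines containing errors
--     error_indices = []
--     for i, line in enumerate(lines):
--         if any(kw in line.lower() for kw in error_keywords):
--             error_indices.append(i)
--
--     if error_indices:
--         # Get context around first error
--         start = max(0, error_indices[0] - 5)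
--         end = min(len(lines), error_indices[-1] + 10)
--         return "\n".join(lines[start:end])
--
--     # Fallback: last N lines
--     return "\n".join(lines[-max_lines:])
-- ===== SOURCE B (Python) =====
-- def _extract_error_snippet(lines: list[str], max_lines: int = 50) -> str:
--     """Extract relevant error portion from logs."""
--     keywords = ("error", "exception", "traceback", "failed", "oom", "killed", "timeout")
--
--     def hit(line):
--         low = line.lower()
--         return any(kw in low for kw in keywords)
--
--     first = next((i for i, line in enumerate(lines) if hit(line)), None)
--     if first is None:
--         return "\n".join(lines[-max_lines:])
--     j = next(j for j, line in enumerate(reversed(lines)) if hit(line))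
--     last = len(lines) - 1 - j
--     return "\n".join(lines[max(0, first - 5):min(len(lines), last + 10)])
-- ===== Notes on version B (the rewrite author's own statement) =====
-- stated objective: alternative
-- what changed: Instead of accumulating the full list of all error-line indices, B finds only the two needed endpoints: a forward scan stopping at the first matching line and a scan over the reversed list stopping at the last match.
import Mathlib
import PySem

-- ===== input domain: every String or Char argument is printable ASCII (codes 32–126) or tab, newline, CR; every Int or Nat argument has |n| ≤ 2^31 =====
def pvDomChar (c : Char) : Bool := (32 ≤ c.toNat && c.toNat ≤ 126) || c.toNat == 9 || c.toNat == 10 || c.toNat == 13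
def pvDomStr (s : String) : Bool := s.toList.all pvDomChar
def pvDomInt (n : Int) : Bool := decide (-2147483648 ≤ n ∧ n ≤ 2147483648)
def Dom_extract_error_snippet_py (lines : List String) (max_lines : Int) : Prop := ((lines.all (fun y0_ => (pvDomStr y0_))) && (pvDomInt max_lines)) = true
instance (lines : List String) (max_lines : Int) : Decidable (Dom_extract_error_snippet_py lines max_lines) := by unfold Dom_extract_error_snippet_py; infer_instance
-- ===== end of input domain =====

-- B finds only the two endpoint indices (first hit by a forward scan, last hit by a scan
-- over the reversed list) instead of collecting every error index; return value only.

-- shared by both programs: 'any(kw in line.lower() for kw in keywords)'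
def pvKeywords : List String :=
  ["error", "exception", "traceback", "failed", "oom", "killed", "timeout"]

def pvHit (line : String) : Bool :=
  pvKeywords.any (fun kw => PySem.Str.isIn kw (PySem.Str.lower line))

-- ===== PORT A =====
def extract_error_snippet_py (lines : List String) (max_lines : Int) : String :=
  let error_indices : List Int :=
    (PySem.List.enumerate lines 0).foldl
      (fun acc p => if pvHit p.2 then acc ++ [p.1] else acc) []
  if error_indices.isEmpty then
    PySem.Str.join "\n" (PySem.List.slice lines (some (-max_lines)) none)
  else
    let start := max 0 ((error_indices.head?.getD 0) - 5)
    let stop := min ((lines.length : Int)) ((error_indices.getLast?.getD 0) + 10)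
    PySem.Str.join "\n" (PySem.List.slice lines (some start) (some stop))

-- ===== PORT B =====
def extract_error_snippet_py_alt (lines : List String) (max_lines : Int) : String :=
  match lines.findIdx? pvHit with
  | none => PySem.Str.join "\n" (PySem.List.slice lines (some (-max_lines)) none)
  | some f =>
      let j := (lines.reverse.findIdx? pvHit).getD 0
      let last : Int := (lines.length : Int) - 1 - (j : Int)
      PySem.Str.join "\n"
        (PySem.List.slice lines (some (max 0 ((f : Int) - 5)))
          (some (min ((lines.length : Int)) (last + 10))))

-- ===== PRECONDITION & SPEC =====
def Spec_extract_error_snippet_py (lines : List String) (max_lines : Int) (out : String) : Prop := out = extract_error_snippet_py_alt lines max_lines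
instance (lines : List String) (max_lines : Int) (out : String) : Decidable (Spec_extract_error_snippet_py lines max_lines out) := by unfold Spec_extract_error_snippet_py; infer_instance

-- ===== CLAIM (what is proved, stated in full; the proofs are below) =====
def Claim_equal_extract_error_snippet_py : Prop := ∀ (lines : List String) (max_lines : Int), Dom_extract_error_snippet_py lines max_lines → Spec_extract_error_snippet_py lines max_lines (extract_error_snippet_py lines max_lines)

-- ===== LEMMAS AND PROOFS =====

-- head of the hit-index list = first hit index
theorem pv_headE (l : List String) (s : Int) :
    ((((PySem.List.enumerate l s).filter (fun p => pvHit p.2)).map (·.1)).head?)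
      = (l.findIdx? pvHit).map (fun (k : Nat) => s + (k : Int)) := by
  induction l generalizing s with
  | nil => simp [PySem.List.enumerate_nil]
  | cons x xs ih =>
    rw [PySem.List.enumerate_cons, List.findIdx?_cons]
    by_cases h : pvHit x
    · simp [h]
    · simp only [List.filter_cons, h, Bool.false_eq_true, if_false]
      rw [ih (s + 1)]
      cases xs.findIdx? pvHit <;> simp <;> ring

-- last of the hit-index list = (length - 1 - first hit index of the reversed list)
theorem pv_lastE (l : List String) (s : Int) :
    ((((PySem.List.enumerate l s).filter (fun p => pvHit p.2)).map (·.1)).getLast?)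
      = (l.reverse.findIdx? pvHit).map (fun (j : Nat) => s + (l.length : Int) - 1 - (j : Int)) := by
  induction l using List.reverseRecOn with
  | nil => simp [PySem.List.enumerate_nil]
  | append_singleton ys x ih =>
    rw [PySem.List.enumerate_append, List.reverse_append]
    simp only [PySem.List.enumerate_cons, PySem.List.enumerate_nil, List.reverse_singleton,
      List.singleton_append, List.findIdx?_cons, List.filter_append, List.map_append]
    by_cases h : pvHit x
    · simp [h]
      ring
    · simp only [List.filter_cons, h, Bool.false_eq_true, if_false,
        List.filter_nil, List.map_nil, List.append_nil]
      rw [ih]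
      cases ys.reverse.findIdx? pvHit <;> simp <;> ring

-- ===== VERDICT (by name: the statement is the Claim_ definition above) =====
theorem extract_error_snippet_py_spec : Claim_equal_extract_error_snippet_py := by
  intro lines max_lines _
  unfold Spec_extract_error_snippet_py extract_error_snippet_py extract_error_snippet_py_alt
  have hfold : (PySem.List.enumerate lines 0).foldl
      (fun acc p => if pvHit p.2 then acc ++ [p.1] else acc) []
      = ((PySem.List.enumerate lines 0).filter (fun p => pvHit p.2)).map (·.1) := by
    rw [PySem.List.foldl_append_if (fun (p : Int × String) => pvHit p.2) (fun (p : Int × String) => p.1)]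
    simp
  simp only [hfold]
  cases hf : lines.findIdx? pvHit with
  | none =>
    have hE := pv_headE lines 0
    rw [hf, Option.map_none, List.head?_eq_none_iff] at hE
    simp [hE]
  | some f =>
    have hE := pv_headE lines 0
    have hL := pv_lastE lines 0
    rw [hf, Option.map_some] at hE
    cases hr : lines.reverse.findIdx? pvHit with
    | none =>
      exfalso
      rw [List.findIdx?_eq_none_iff] at hr
      have hlt := List.findIdx?_eq_some_iff_findIdx_eq.mp hf |>.1
      have hp : pvHit lines[f] = true := List.findIdx?_eq_some_iff_getElem.mp hf |>.2.1
      have hfalse := hr _ (List.mem_reverse.mpr (lines.getElem_mem hlt))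
      rw [hp] at hfalse
      cases hfalse
    | some j =>
      rw [hr, Option.map_some] at hL
      have hne : (((PySem.List.enumerate lines 0).filter (fun p => pvHit p.2)).map (·.1)) ≠ [] := by
        intro h; rw [h] at hE; simp at hE
      rw [if_neg (by simpa using hne), hE, hL]
      simp
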